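-- pv_equiv track=rewrite | github.com/jeomn/Algorithms | programmers/Level2/짝지어 제거하기.py | solution
-- ===== SOURCE A (Python) =====
-- def solution(s):
--     compare_list = []
--
--     for string in s:
--         if len(compare_list) == 0:
--             compare_list.append(string)
--         elif string == compare_list[-1]:
--             del compare_list[-1]
--         else:
--             compare_list.append(string)
--
--     if len(compare_list) == 0:
--         answer = 1
--     else:
--         answer = 0
--
--     return answer
-- ===== SOURCE B (Python) =====
-- def _one_pass(s):
--     out = []
--     i = 0
--     while i < len(s):
--         if i + 1 < len(s) and s[i] == s[i + 1]:
--             i += 2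
--         else:
--             out.append(s[i])
--             i += 1
--     return "".join(out)
--
--
-- def solution(s):
--     while True:
--         t = _one_pass(s)
--         if t == s:
--             return 1 if s == "" else 0
--         s = t
-- ===== Notes on version B (the rewrite author's own statement) =====
-- stated objective: alternative
-- what changed: Replaces the single-pass stack simulation with repeated whole-string reduction: each pass removes adjacent equal pairs from the current string, iterated to a fixed point, then tests emptiness.
import Mathlib
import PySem

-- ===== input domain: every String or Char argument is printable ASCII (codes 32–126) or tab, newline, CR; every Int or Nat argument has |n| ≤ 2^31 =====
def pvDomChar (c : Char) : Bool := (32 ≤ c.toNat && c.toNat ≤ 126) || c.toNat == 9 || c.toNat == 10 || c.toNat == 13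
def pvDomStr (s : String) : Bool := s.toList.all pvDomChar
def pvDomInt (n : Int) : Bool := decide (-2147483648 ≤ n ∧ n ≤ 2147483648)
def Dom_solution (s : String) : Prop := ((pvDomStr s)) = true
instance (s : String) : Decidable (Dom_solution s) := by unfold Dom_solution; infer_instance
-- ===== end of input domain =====

-- B replaces A's one-pass stack with repeated whole-string pair-removal passes iterated to a
-- fixed point (an alternative decomposition, not faster); return-value equivalence is proved.

-- ===== PORT A =====
-- one step of A's loop body: compare_list is kept in Python order (append at the end,
-- compare_list[-1] = getLast?, del compare_list[-1] = dropLast)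
def solnStep (acc : List Char) (c : Char) : List Char :=
  if acc.length = 0 then acc ++ [c]
  else if acc.getLast? = some c then acc.dropLast
  else acc ++ [c]

def solution (s : String) : Int :=
  let compare_list := s.toList.foldl solnStep []
  if compare_list.length = 0 then 1 else 0

-- ===== PORT B =====
-- _one_pass: left-to-right scan dropping adjacent equal pairs (i advances by 2 on a pair)
def onePass : List Char → List Char
  | [] => []
  | [c] => [c]
  | a :: b :: r => if a = b then onePass r else a :: onePass (b :: r)

lemma onePass_length_le : ∀ l : List Char, (onePass l).length ≤ l.length := by
  intro l
  induction l using onePass.induct with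
  | case1 => simp [onePass]
  | case2 c => simp [onePass]
  | case3 b r ih => simp only [onePass, if_true]; simp; omega
  | case4 a b r h ih => simp only [onePass, if_neg h] at *; simp at *; omega

lemma onePass_eq_of_length : ∀ l : List Char, (onePass l).length = l.length → onePass l = l := by
  intro l
  induction l using onePass.induct with
  | case1 => intro _; rfl
  | case2 c => intro _; rfl
  | case3 b r ih =>
    intro hlen
    have := onePass_length_le r
    simp only [onePass, if_true] at hlen
    simp at hlen; omega
  | case4 a b r h ih =>
    intro hlen
    simp only [onePass, if_neg h] at hlen ⊢
    simp at hlen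
    rw [ih (by simp; omega)]

-- termination lemma cited by reduceLoop's decreasing_by
lemma onePass_length_lt (l : List Char) (h : onePass l ≠ l) : (onePass l).length < l.length := by
  have h1 := onePass_length_le l
  rcases Nat.lt_or_ge (onePass l).length l.length with h2 | h2
  · exact h2
  · exact absurd (onePass_eq_of_length l (Nat.le_antisymm h1 h2)) h

-- the `while True` loop of B: pass until a pass changes nothing
def reduceLoop (l : List Char) : List Char :=
  if h : onePass l = l then l else reduceLoop (onePass l)
termination_by l.length
decreasing_by exact onePass_length_lt l h

def solution_alt (s : String) : Int :=
  if reduceLoop s.toList = [] then 1 else 0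

-- ===== PRECONDITION & SPEC =====
def Spec_solution (s : String) (out : Int) : Prop := out = solution_alt s
instance (s : String) (out : Int) : Decidable (Spec_solution s out) := by unfold Spec_solution; infer_instance

-- ===== CLAIM (what is proved, stated in full; the proofs are below) =====
def Claim_equal_solution : Prop := ∀ (s : String), Dom_solution s → Spec_solution s (solution s)

-- ===== LEMMAS AND PROOFS =====

-- A's stack, seen from the top (reverse of compare_list)
def stepR (st : List Char) (c : Char) : List Char :=
  if st = [] then [c]
  else if st.head? = some c then st.tail
  else c :: st

lemma stepA_rev (acc : List Char) (c : Char) :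
    (solnStep acc c).reverse = stepR acc.reverse c := by
  induction acc using List.reverseRecOn with
  | nil => simp [solnStep, stepR]
  | append_singleton as a _ =>
    simp only [solnStep, stepR]
    by_cases hac : a = c <;> simp [hac]

lemma foldA_rev : ∀ (l : List Char) (acc : List Char),
    (List.foldl solnStep acc l).reverse = List.foldl stepR acc.reverse l := by
  intro l
  induction l with
  | nil => intro acc; rfl
  | cons a l ih =>
    intro acc
    simp only [List.foldl_cons]
    rw [ih, stepA_rev]

lemma stepR_cons_eq (y : Char) (t : List Char) : stepR (y :: t) y = t := by
  have h1 : (y :: t) ≠ [] := List.cons_ne_nil y t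
  simp only [stepR, if_neg h1, List.head?_cons, if_true, List.tail_cons]

lemma stepR_cons_ne (y : Char) (t : List Char) (a : Char) (h : y ≠ a) :
    stepR (y :: t) a = a :: y :: t := by
  have h1 : (y :: t) ≠ [] := List.cons_ne_nil y t
  have h2 : ((y :: t).head? = some a) = False := by
    simp only [List.head?_cons, Option.some_inj]
    exact eq_false h
  simp only [stepR, if_neg h1, h2, if_false]

lemma chain_stepR (st : List Char) (c : Char) (h : List.IsChain (· ≠ ·) st) :
    List.IsChain (· ≠ ·) (stepR st c) := by
  cases st with
  | nil => simp [stepR]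
  | cons y t =>
    by_cases hyc : y = c
    · subst hyc
      rw [stepR_cons_eq]
      simpa using h.tail
    · rw [stepR_cons_ne y t c hyc]
      exact List.isChain_cons_cons.mpr ⟨fun e => hyc e.symm, h⟩

lemma stepR_pair (st : List Char) (h : List.IsChain (· ≠ ·) st) (x : Char) :
    stepR (stepR st x) x = st := by
  cases st with
  | nil => simp [stepR]
  | cons y t =>
    by_cases hyx : y = x
    · subst hyx
      rw [stepR_cons_eq]
      cases t with
      | nil => simp [stepR]
      | cons z t' =>
        have hyz : y ≠ z := (List.isChain_cons_cons.mp h).1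
        rw [stepR_cons_ne z t' y (fun e => hyz e.symm)]
    · rw [stepR_cons_ne y t x hyx, stepR_cons_eq]

lemma onePass_fold : ∀ (l st : List Char), List.IsChain (· ≠ ·) st →
    List.foldl stepR st (onePass l) = List.foldl stepR st l := by
  intro l
  induction l using onePass.induct with
  | case1 => intro st _; rfl
  | case2 c => intro st _; rfl
  | case3 b r ih =>
    intro st hst
    simp only [onePass, if_true, List.foldl_cons]
    rw [ih st hst, stepR_pair st hst b]
  | case4 a b r h ih =>
    intro st hst
    simp only [onePass, if_neg h, List.foldl_cons]
    exact ih (stepR st a) (chain_stepR st a hst)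

lemma chain_of_fixed : ∀ l : List Char, onePass l = l → List.IsChain (· ≠ ·) l := by
  intro l
  induction l using onePass.induct with
  | case1 => intro _; simp
  | case2 c => intro _; simp
  | case3 b r ih =>
    intro hfix
    simp only [onePass, if_true] at hfix
    have := onePass_length_le r
    have := congrArg List.length hfix
    simp at this; omega
  | case4 a b r h ih =>
    intro hfix
    simp only [onePass, if_neg h, List.cons.injEq] at hfix
    exact List.isChain_cons_cons.mpr ⟨h, ih hfix.2⟩

lemma fold_chain : ∀ (r st : List Char), List.IsChain (· ≠ ·) r →
    (∀ a, r.head? = some a → st.head? ≠ some a) →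
    List.foldl stepR st r = r.reverse ++ st := by
  intro r
  induction r with
  | nil => intro st _ _; simp
  | cons a r' ih =>
    intro st hch hhd
    have hstep : stepR st a = a :: st := by
      cases st with
      | nil => rfl
      | cons y t =>
        have hya : y ≠ a := by
          intro e
          exact hhd a rfl (by simp [e])
        exact stepR_cons_ne y t a hya
    simp only [List.foldl_cons, hstep]
    rw [ih (a :: st) (by simpa using hch.tail) ?_]
    · simp
    · intro b hb hcontra
      cases r' with
      | nil => simp at hb
      | cons c r'' =>
        have hbc : c = b := by simpa using hb
        have hac : a ≠ c := (List.isChain_cons_cons.mp hch).1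
        have hab : b = a := by simpa using hcontra.symm
        exact hac (hab ▸ hbc).symm

lemma reduceLoop_fold : ∀ l : List Char,
    List.foldl stepR [] (reduceLoop l) = List.foldl stepR [] l := by
  intro l
  induction l using reduceLoop.induct with
  | case1 l h => rw [reduceLoop, dif_pos h]
  | case2 l h ih =>
    rw [reduceLoop, dif_neg h]
    rw [ih, onePass_fold l [] (by simp)]

lemma reduceLoop_fixed : ∀ l : List Char, onePass (reduceLoop l) = reduceLoop l := by
  intro l
  induction l using reduceLoop.induct with
  | case1 l h => rw [reduceLoop, dif_pos h]; exact h
  | case2 l h ih => rw [reduceLoop, dif_neg h]; exact ih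

lemma reduceLoop_empty_iff (l : List Char) :
    reduceLoop l = [] ↔ List.foldl stepR [] l = [] := by
  constructor
  · intro h
    rw [← reduceLoop_fold l, h]
    rfl
  · intro h
    have hch := chain_of_fixed _ (reduceLoop_fixed l)
    have hfc := fold_chain (reduceLoop l) [] hch (by simp)
    rw [reduceLoop_fold l, h] at hfc
    have hr : (reduceLoop l).reverse = [] := by simpa using hfc.symm
    simpa using congrArg List.reverse hr

-- ===== VERDICT (by name: the statement is the Claim_ definition above) =====
theorem solution_spec : Claim_equal_solution := by
  intro s _
  unfold Spec_solution solution solution_alt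
  have hrev := foldA_rev s.toList []
  simp only [List.reverse_nil] at hrev
  have hiff : (s.toList.foldl solnStep []).length = 0 ↔ reduceLoop s.toList = [] := by
    rw [reduceLoop_empty_iff, ← hrev]
    simp [List.length_eq_zero_iff]
  by_cases h : (s.toList.foldl solnStep []).length = 0
  · rw [if_pos h, if_pos (hiff.mp h)]
  · rw [if_neg h, if_neg (fun e => h (hiff.mpr e))]
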